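-- pv_equiv track=rewrite | github.com/szunez/py-apps | olgapy/sps2olga/get-ppl.py | getProfileSections
-- ===== SOURCE A (Python) =====
-- def getProfileSections(elevationProfile) :
--     d = 0
--     dd = 0
--     olgaGeometry = '        '
--     for g in elevationProfile :
--         if dd <= 4 :
--             olgaGeometry = olgaGeometry + g + ' ' * (13-len(g))
--         else :
--             olgaGeometry = olgaGeometry + '\n        ' + g + ' ' * (13-len(g))
--             dd = 0
--         d = d + 1
--         dd = dd + 1
--     return olgaGeometry
-- ===== SOURCE B (Python) =====
-- def getProfileSections(elevationProfile):
--     items = list(elevationProfile)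
--     lines = []
--     while items:
--         chunk, items = items[:5], items[5:]
--         lines.append(''.join(g + ' ' * (13 - len(g)) for g in chunk))
--     return '        ' + '\n        '.join(lines)
-- ===== Notes on version B (the rewrite author's own statement) =====
-- stated objective: simpler
-- what changed: Replaced A's flat counter-driven fold (position counter dd deciding when to emit a newline, plus a dead counter d) by a chunk-then-join decomposition: slice the list into groups of 5, render each group as one line, and join the lines with '\n '.
import Mathlib
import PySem

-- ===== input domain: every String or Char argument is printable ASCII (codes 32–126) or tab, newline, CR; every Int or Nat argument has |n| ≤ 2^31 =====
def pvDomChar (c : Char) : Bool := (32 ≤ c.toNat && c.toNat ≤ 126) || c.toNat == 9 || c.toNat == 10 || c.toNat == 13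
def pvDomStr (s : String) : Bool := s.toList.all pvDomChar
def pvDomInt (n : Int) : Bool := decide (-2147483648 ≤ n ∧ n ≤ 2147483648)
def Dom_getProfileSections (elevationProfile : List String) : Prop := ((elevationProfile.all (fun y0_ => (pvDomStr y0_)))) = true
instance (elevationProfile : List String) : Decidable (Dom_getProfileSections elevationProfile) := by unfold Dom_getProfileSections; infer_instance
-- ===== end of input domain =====

-- B replaces A's counter-driven flat fold by slicing the list into chunks of 5 and joining
-- one rendered line per chunk (simpler decomposition, same output).

-- ===== PORT A =====
-- g + ' ' * (13 - len(g))   (Python's ' '*k is '' for k ≤ 0; Nat subtraction matches)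
def pvPad (g : String) : List Char := g.toList ++ List.replicate (13 - g.toList.length) ' '
-- the literal '\n        '
def pvNL : List Char := '\n' :: List.replicate 8 ' '
-- the body of A's for-loop, state = (d, dd, olgaGeometry)
def pvStepA (s : Int × Int × List Char) (g : String) : Int × Int × List Char :=
  if s.2.1 ≤ 4 then
    (s.1 + 1, s.2.1 + 1, s.2.2 ++ pvPad g)
  else
    (s.1 + 1, (0 : Int) + 1, s.2.2 ++ pvNL ++ pvPad g)

def getProfileSections (elevationProfile : List String) : String :=
  String.ofList (elevationProfile.foldl pvStepA (0, 0, List.replicate 8 ' ')).2.2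

-- ===== PORT B =====
-- ''.join(g + ' ' * (13 - len(g)) for g in chunk)
def pvLine (chunk : List String) : List Char := PySem.Chars.join [] (chunk.map pvPad)

-- the while loop: items[:5] rendered as a line, continue on items[5:]
def pvChunkLines (items : List String) : List (List Char) :=
  if h : items = [] then []
  else pvLine (PySem.List.slice items none (some 5)) ::
       pvChunkLines (PySem.List.slice items (some 5) none)
termination_by items.length
decreasing_by
  rw [PySem.List.slice_from items (by norm_num : (0:Int) ≤ 5)]
  have hl : 0 < items.length := List.length_pos_iff.mpr h
  simp only [List.length_drop]
  omega

def getProfileSections_alt (elevationProfile : List String) : String :=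
  String.ofList (List.replicate 8 ' ' ++ PySem.Chars.join pvNL (pvChunkLines elevationProfile))

-- ===== PRECONDITION & SPEC =====
def Spec_getProfileSections (elevationProfile : List String) (out : String) : Prop := out = getProfileSections_alt elevationProfile
instance (elevationProfile : List String) (out : String) : Decidable (Spec_getProfileSections elevationProfile out) := by unfold Spec_getProfileSections; infer_instance

-- ===== CLAIM (what is proved, stated in full; the proofs are below) =====
def Claim_equal_getProfileSections : Prop := ∀ (elevationProfile : List String), Dom_getProfileSections elevationProfile → Spec_getProfileSections elevationProfile (getProfileSections elevationProfile)

-- ===== LEMMAS AND PROOFS =====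

theorem pvLine_nil : pvLine [] = [] := by
  simp [pvLine, PySem.Chars.join_nil]

theorem pvLine_cons (g : String) (c : List String) :
    pvLine (g :: c) = pvPad g ++ pvLine c := by
  cases c with
  | nil => simp [pvLine, PySem.Chars.join_singleton, PySem.Chars.join_nil]
  | cons b r => simp [pvLine, PySem.Chars.join_cons_cons]

theorem pvChunkLines_eq (l : List String) :
    pvChunkLines l = if l = [] then [] else pvLine (l.take 5) :: pvChunkLines (l.drop 5) := by
  conv_lhs => rw [pvChunkLines.eq_def]
  split
  · rfl
  · rw [PySem.List.slice_to l (by norm_num : (0:Int) ≤ 5),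
        PySem.List.slice_from l (by norm_num : (0:Int) ≤ 5)]
    rfl

theorem pvJoin_nl_cons (x : List Char) (xs : List (List Char)) :
    PySem.Chars.join pvNL (x :: xs) = x ++ xs.flatMap (fun c => pvNL ++ c) := by
  induction xs generalizing x with
  | nil => simp [PySem.Chars.join_singleton]
  | cons y r ih =>
      rw [PySem.Chars.join_cons_cons, ih]
      simp [List.append_assoc]

theorem pvFoldA (l : List String) : ∀ (m : Nat) (d : Int) (olga : List Char), m ≤ 5 →
    (List.foldl pvStepA (d, (m : Int), olga) l).2.2
      = olga ++ pvLine (l.take (5 - m))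
          ++ (pvChunkLines (l.drop (5 - m))).flatMap (fun c => pvNL ++ c) := by
  induction l with
  | nil =>
      intro m d olga hm
      simp [pvLine_nil, pvChunkLines_eq]
  | cons g rest ih =>
      intro m d olga hm
      by_cases h4 : m ≤ 4
      · have hi : ((m : Int) ≤ 4) := by exact_mod_cast h4
        have htake : (g :: rest).take (5 - m) = g :: rest.take (5 - (m + 1)) := by
          have : 5 - m = (5 - (m + 1)) + 1 := by omega
          rw [this, List.take_succ_cons]
        have hdrop : (g :: rest).drop (5 - m) = rest.drop (5 - (m + 1)) := by
          have : 5 - m = (5 - (m + 1)) + 1 := by omega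
          rw [this, List.drop_succ_cons]
        have hcast : (m : Int) + 1 = ((m + 1 : Nat) : Int) := by push_cast; ring
        simp only [List.foldl_cons, pvStepA, if_pos hi]
        rw [hcast, ih (m + 1) (d + 1) (olga ++ pvPad g) (by omega), htake, hdrop,
            pvLine_cons]
        simp [List.append_assoc]
      · have hm5 : m = 5 := by omega
        subst hm5
        simp only [List.foldl_cons, pvStepA]
        rw [if_neg (by decide : ¬ (((5 : Nat) : Int) ≤ 4))]
        rw [show ((0 : Int) + 1) = ((1 : Nat) : Int) from by norm_num]
        rw [ih 1 (d + 1) (olga ++ pvNL ++ pvPad g) (by omega)]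
        have hrhs : pvChunkLines (g :: rest)
            = pvLine (g :: rest.take 4) :: pvChunkLines (rest.drop 4) := by
          rw [pvChunkLines_eq]
          simp
        simp [hrhs, pvLine_cons, pvLine_nil, List.append_assoc]

-- ===== VERDICT (by name: the statement is the Claim_ definition above) =====
theorem getProfileSections_spec : Claim_equal_getProfileSections := by
  intro ep _
  unfold Spec_getProfileSections getProfileSections getProfileSections_alt
  have h0 : ((0 : Int)) = ((0 : Nat) : Int) := by norm_num
  rw [show ((0, 0, List.replicate 8 ' ') : Int × Int × List Char)
        = (0, ((0 : Nat) : Int), List.replicate 8 ' ') from by norm_num]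
  rw [pvFoldA ep 0 0 (List.replicate 8 ' ') (by omega)]
  cases hep : ep with
  | nil =>
      simp [pvLine_nil, pvChunkLines_eq, PySem.Chars.join_nil]
  | cons g rest =>
      have hch : pvChunkLines (g :: rest)
          = pvLine ((g :: rest).take 5) :: pvChunkLines ((g :: rest).drop 5) := by
        rw [pvChunkLines_eq]; simp
      rw [hch, pvJoin_nl_cons]
      simp
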